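-- pv_equiv track=rewrite | github.com/docostar/itifa | fun.py | get_section_marks
-- ===== SOURCE A (Python) =====
-- sections_max_marks = [
--     [2, 5, 8],  # Section 1
--     [3, 2, 5],  # Section 2
--     [3, 3, 4],  # Section 3
--     [1, 2, 2],  # Section 4
--     [4, 3, 3],  # Section 5
--     [4, 3, 3],  # Section 6
--     [3, 5, 2],  # Section 7
--     [7, 3, 5],  # Section 8
--     [7, 5, 3],  # Section 9
-- ]
--
-- def get_section_marks(total_marks, sections=sections_max_marks):
--     # Ensure total marks are valid
--     max_total = sum(sum(section) for section in sections)
--     min_total = len(sections)  # Minimum 1 mark per sub-section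
--
--     if not (min_total <= total_marks <= max_total):
--         raise ValueError("Total marks must be between the minimum and maximum possible marks.")
--
--     # Initialize the distribution with minimum marks (1 mark for each sub-section)
--     distributed_marks = [[1 for _ in section] for section in sections]
--     remaining_marks = total_marks - sum(sum(section) for section in distributed_marks)
--
--     while remaining_marks > 0:
--         for section_idx, section in enumerate(sections):
--             for sub_idx, max_mark in enumerate(section):
--                 if remaining_marks == 0:
--                     break
--                 # Current mark for the sub-section
--                 current_mark = distributed_marks[section_idx][sub_idx]
--                 # Add 1 mark if it doesn't exceed the max limit
--                 if current_mark < max_mark: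
--                     distributed_marks[section_idx][sub_idx] += 1
--                     remaining_marks -= 1
--
--     return distributed_marks
-- ===== SOURCE B (Python) =====
-- sections_max_marks = [
--     [2, 5, 8],
--     [3, 2, 5],
--     [3, 3, 4],
--     [1, 2, 2],
--     [4, 3, 3],
--     [4, 3, 3],
--     [3, 5, 2],
--     [7, 3, 5],
--     [7, 5, 3],
-- ]
--
-- def get_section_marks(total_marks, sections=sections_max_marks):
--     max_total = sum(sum(section) for section in sections)
--     min_total = len(sections)
--     if not (min_total <= total_marks <= max_total):
--         raise ValueError("Total marks must be between the minimum and maximum possible marks.")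
--
--     # Every cell starts at 1; k full round-robin levels raise a cell with cap m
--     # to min(m, 1 + k) (caps <= 1 never move).  Find the largest k whose total
--     # consumption sum(min(k, deficit)) fits, by binary search, then hand the
--     # remainder out one mark per still-raisable cell in order.
--     caps = [m for section in sections for m in section]
--     n = len(caps)
--     remaining = total_marks - n
--     if remaining < 0:
--         remaining = 0
--     deficits = [m - 1 if m > 1 else 0 for m in caps]
--     hi = 0
--     for d in deficits:
--         if hi < d:
--             hi = d
--     lo = 0
--     while lo < hi:
--         mid = (lo + hi + 1) // 2
--         if sum(min(d, mid) for d in deficits) <= remaining: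
--             lo = mid
--         else:
--             hi = mid - 1
--     k = lo
--     r = remaining - sum(min(d, k) for d in deficits)
--     out = []
--     for section in sections:
--         row = []
--         for m in section:
--             v = min(m, 1 + k) if m > 1 else 1
--             if 1 + k < m and r > 0:
--                 v += 1
--                 r -= 1
--             row.append(v)
--         out.append(row)
--     return out
-- ===== Notes on version B (the rewrite author's own statement) =====
-- stated objective: alternative
-- what changed: A hands out one mark per cell per round-robin pass until the remainder is gone; B instead computes the number of complete passes in closed form by binary-searching the largest level k with sum(min(k, deficit)) <= remainder and then distributes the partial remainder in a single in-order sweep, trading A's pass-count-dependent loop for a fixed number of scans.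
import Mathlib
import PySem

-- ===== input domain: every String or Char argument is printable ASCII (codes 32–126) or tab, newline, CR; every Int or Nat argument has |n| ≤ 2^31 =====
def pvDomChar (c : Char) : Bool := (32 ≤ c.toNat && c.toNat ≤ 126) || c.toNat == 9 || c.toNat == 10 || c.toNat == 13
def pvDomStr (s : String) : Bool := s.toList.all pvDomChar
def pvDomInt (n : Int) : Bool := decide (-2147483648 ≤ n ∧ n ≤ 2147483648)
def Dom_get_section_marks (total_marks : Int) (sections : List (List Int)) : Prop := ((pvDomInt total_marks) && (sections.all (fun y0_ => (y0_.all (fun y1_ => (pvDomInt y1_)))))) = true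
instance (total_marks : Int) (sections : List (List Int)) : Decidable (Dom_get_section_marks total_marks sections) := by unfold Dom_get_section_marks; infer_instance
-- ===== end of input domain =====

-- B replaces A's one-mark-per-pass round-robin loop by a binary search for the number of
-- complete passes plus a single in-order assignment sweep (an alternative algorithm
-- of different structure; equal results proved on all of Pre_).

-- ===== PORT A =====
-- inner 'for sub_idx, max_mark in enumerate(section)' over one section, threading remaining_marks
def aPassRow : Int → List Int → List Int → List Int × Int
  | rem, v :: vs, m :: ms =>
    if rem = 0 then (v :: vs, rem)
    else if v < m then
      let p := aPassRow (rem - 1) vs ms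
      ((v + 1) :: p.1, p.2)
    else
      let p := aPassRow rem vs ms
      (v :: p.1, p.2)
  | rem, vs, _ => (vs, rem)

-- outer 'for section_idx, section in enumerate(sections)'
def aPass : Int → List (List Int) → List (List Int) → List (List Int) × Int
  | rem, d :: ds, s :: ss =>
    let p := aPassRow rem d s
    let q := aPass p.2 ds ss
    (p.1 :: q.1, q.2)
  | rem, ds, _ => (ds, rem)

-- 'while remaining_marks > 0'; fuel = initial remaining (each pass hands out ≥ 1 mark)
def aLoop : Nat → Int → List (List Int) → List (List Int) → List (List Int)
  | 0, _, dist, _ => dist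
  | f + 1, rem, dist, secs =>
    if 0 < rem then
      let p := aPass rem dist secs
      aLoop f p.2 p.1 secs
    else dist

def get_section_marks (total_marks : Int) (sections : List (List Int)) : List (List Int) :=
  let max_total := (sections.map (fun s => s.sum)).sum
  let min_total : Int := sections.length
  if min_total ≤ total_marks ∧ total_marks ≤ max_total then
    let dist := sections.map (fun s => s.map (fun _ => (1 : Int)))
    let rem := total_marks - (dist.map (fun s => s.sum)).sum
    aLoop rem.toNat rem dist sections
  else []  -- ValueError in Python (outside Pre_)

-- ===== PORT B =====
-- sum(min(d, k) for d in deficits)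
def bConsumed (k : Int) (ds : List Int) : Int := (ds.map (fun d => min d k)).sum

-- 'while lo < hi: …' binary search; fuel = (hi - lo).toNat
def bSearch : Nat → Int → Int → Int → List Int → Int
  | 0, lo, _, _, _ => lo
  | f + 1, lo, hi, rem, ds =>
    if lo < hi then
      let mid := PySem.Int.floordiv (lo + hi + 1) 2
      if bConsumed mid ds ≤ rem then bSearch f mid hi rem ds
      else bSearch f lo (mid - 1) rem ds
    else lo

-- 'for m in section: …' of the final assignment sweep, threading r
def bAssignRow : Int → Int → List Int → List Int × Int
  | _, r, [] => ([], r)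
  | k, r, m :: ms =>
    let v := if 1 < m then min m (1 + k) else 1
    if 1 + k < m ∧ 0 < r then
      let p := bAssignRow k (r - 1) ms
      ((v + 1) :: p.1, p.2)
    else
      let p := bAssignRow k r ms
      (v :: p.1, p.2)

-- 'for section in sections: …'
def bAssign : Int → Int → List (List Int) → List (List Int) × Int
  | _, r, [] => ([], r)
  | k, r, s :: ss =>
    let p := bAssignRow k r s
    let q := bAssign k p.2 ss
    (p.1 :: q.1, q.2)

def get_section_marks_alt (total_marks : Int) (sections : List (List Int)) : List (List Int) :=
  let max_total := (sections.map (fun s => s.sum)).sum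
  let min_total : Int := sections.length
  if min_total ≤ total_marks ∧ total_marks ≤ max_total then
    let caps := sections.flatMap id
    let n : Int := caps.length
    let rem0 := total_marks - n
    let remaining := if rem0 < 0 then 0 else rem0
    let deficits := caps.map (fun m => if 1 < m then m - 1 else 0)
    let hi := deficits.foldl (fun h d => if h < d then d else h) 0
    let k := bSearch hi.toNat 0 hi remaining deficits
    let r := remaining - bConsumed k deficits
    (bAssign k r sections).1
  else []  -- ValueError in Python (outside Pre_)

-- ===== PRECONDITION & SPEC =====
-- Exactly the inputs on which Python A returns (otherwise both programs raise ValueError).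
def Pre_get_section_marks (total_marks : Int) (sections : List (List Int)) : Prop :=
  (sections.length : Int) ≤ total_marks ∧ total_marks ≤ (sections.map (fun s => s.sum)).sum
instance (total_marks : Int) (sections : List (List Int)) : Decidable (Pre_get_section_marks total_marks sections) := by unfold Pre_get_section_marks; infer_instance

def pvWitness_get_section_marks : Int × List (List Int) := (20, [[2, 5, 8], [3, 2, 5]])

def Spec_get_section_marks (total_marks : Int) (sections : List (List Int)) (out : List (List Int)) : Prop := out = get_section_marks_alt total_marks sections
instance (total_marks : Int) (sections : List (List Int)) (out : List (List Int)) : Decidable (Spec_get_section_marks total_marks sections out) := by unfold Spec_get_section_marks; infer_instance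

-- ===== CLAIM (what is proved, stated in full; the proofs are below) =====
def Claim_equal_get_section_marks : Prop := ∀ (total_marks : Int) (sections : List (List Int)), Dom_get_section_marks total_marks sections → Pre_get_section_marks total_marks sections → Spec_get_section_marks total_marks sections (get_section_marks total_marks sections)

-- ===== LEMMAS AND PROOFS =====

-- value of a cell with cap m after k complete passes (every cell starts at 1)
def clampv (k m : Int) : Int := if 1 < m then min m (1 + k) else 1
-- how much a cell with cap m can still absorb in total
def defic (m : Int) : Int := if 1 < m then m - 1 else 0
-- number of cells still below their cap after k complete passes
def cntF (k : Int) (l : List Int) : Int := ((l.countP (fun m => decide (1 + k < m)) : Nat) : Int)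
-- total head-room left after k complete passes
def capF (k : Int) (l : List Int) : Int := (l.map (fun m => max 0 (m - (1 + k)))).sum
-- the state after k complete passes
def uniform (k : Int) (secs : List (List Int)) : List (List Int) := secs.map (fun s => s.map (clampv k))
def flatc (secs : List (List Int)) : List Int := secs.flatMap id
-- marks consumed by passes k, k+1, …, k+t-1
def cB (l : List Int) (k : Int) : Nat → Int
  | 0 => 0
  | t + 1 => cntF k l + cB l (k + 1) t

theorem cntF_nonneg (k : Int) (l : List Int) : 0 ≤ cntF k l := by
  unfold cntF; positivity

theorem cntF_cons (k m : Int) (l : List Int) :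
    cntF k (m :: l) = (if 1 + k < m then 1 else 0) + cntF k l := by
  unfold cntF; by_cases h : 1 + k < m <;> simp [List.countP_cons, h] <;> push_cast <;> ring

theorem cntF_append (k : Int) (l1 l2 : List Int) :
    cntF k (l1 ++ l2) = cntF k l1 + cntF k l2 := by
  unfold cntF; rw [List.countP_append]; push_cast; ring

theorem capF_nonneg (k : Int) (l : List Int) : 0 ≤ capF k l := by
  induction l with
  | nil => simp [capF]
  | cons m l ih => simp only [capF, List.map_cons, List.sum_cons] at *; omega

theorem capF_zero_of_cntF (k : Int) (l : List Int) (h : cntF k l = 0) : capF k l = 0 := by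
  induction l with
  | nil => simp [capF]
  | cons m l ih =>
    rw [cntF_cons] at h
    have h2 := cntF_nonneg k l
    have hm : ¬ (1 + k < m) := by by_contra hc; rw [if_pos hc] at h; omega
    rw [if_neg hm] at h
    simp only [capF, List.map_cons, List.sum_cons]
    have := ih (by omega)
    simp only [capF] at this
    omega

theorem capF_succ (k : Int) (l : List Int) : capF (k + 1) l = capF k l - cntF k l := by
  induction l with
  | nil => simp [capF, cntF]
  | cons m l ih =>
    rw [cntF_cons]
    simp only [capF, List.map_cons, List.sum_cons]
    simp only [capF] at ih
    split_ifs with hm <;> omega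

theorem sum_sub_len_le_capF (l : List Int) : l.sum - l.length ≤ capF 0 l := by
  induction l with
  | nil => simp [capF]
  | cons m l ih =>
    simp only [capF, List.map_cons, List.sum_cons, List.length_cons] at *
    push_cast
    push_cast at ih
    omega

theorem cB_nonneg (l : List Int) (k : Int) (t : Nat) : 0 ≤ cB l k t := by
  induction t generalizing k with
  | zero => simp [cB]
  | succ t ih =>
    simp only [cB]
    have h1 := cntF_nonneg k l
    have h2 := ih (k + 1)
    omega

theorem cB_succ_right (l : List Int) (k : Int) (t : Nat) :
    cB l k (t + 1) = cB l k t + cntF (k + t) l := by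
  induction t generalizing k with
  | zero => simp [cB]
  | succ t ih =>
    have h := ih (k + 1)
    rw [show cB l k (t + 1 + 1) = cntF k l + cB l (k + 1) (t + 1) from rfl, h,
        show cB l k (t + 1) = cntF k l + cB l (k + 1) t from rfl,
        show k + ((t + 1 : Nat) : Int) = k + 1 + (t : Int) by push_cast; ring]
    ring

theorem consumed_defic_zero (l : List Int) : bConsumed 0 (l.map defic) = 0 := by
  induction l with
  | nil => simp [bConsumed]
  | cons m ms ih =>
    simp only [bConsumed, List.map_cons, List.sum_cons] at *
    have hh : min (defic m) 0 = 0 := by unfold defic; split_ifs <;> omega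
    omega

theorem consumed_defic_succ (l : List Int) (t : Int) (ht : 0 ≤ t) :
    bConsumed (t + 1) (l.map defic) = bConsumed t (l.map defic) + cntF t l := by
  induction l with
  | nil => simp [bConsumed, cntF]
  | cons m ms ih =>
    simp only [bConsumed, List.map_cons, List.sum_cons] at *
    rw [cntF_cons]
    by_cases hm : 1 + t < m
    · rw [if_pos hm]
      have hh : min (defic m) (t + 1) = min (defic m) t + 1 := by
        unfold defic; split_ifs <;> omega
      omega
    · rw [if_neg hm]
      have hh : min (defic m) (t + 1) = min (defic m) t := by
        unfold defic; split_ifs <;> omega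
      omega

theorem consumed_eq_cB (l : List Int) (t : Nat) :
    bConsumed (t : Int) (l.map defic) = cB l 0 t := by
  induction t with
  | zero =>
    simpa using consumed_defic_zero l
  | succ t ih =>
    rw [cB_succ_right, ← ih,
        show ((t + 1 : Nat) : Int) = (t : Int) + 1 by push_cast; ring,
        consumed_defic_succ l t (by positivity),
        show (0 : Int) + (t : Int) = (t : Int) by ring]

theorem uniform_step (k : Int) (secs : List (List Int)) (hk : 0 ≤ k)
    (h : cntF k (flatc secs) = 0) : uniform k secs = uniform (k + 1) secs := by
  have h' : ∀ m ∈ flatc secs, ¬ (1 + k < m) := by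
    intro m hm
    have hc : (flatc secs).countP (fun m => decide (1 + k < m)) = 0 := by
      unfold cntF at h; exact_mod_cast h
    have := List.countP_eq_zero.mp hc m hm
    simpa using this
  unfold uniform
  apply List.map_congr_left
  intro s hs
  apply List.map_congr_left
  intro m hm
  have hmf : m ∈ flatc secs := by
    unfold flatc
    exact List.mem_flatMap.mpr ⟨s, hs, by simpa⟩
  have := h' m hmf
  unfold clampv
  split_ifs <;> omega

theorem uniform_eq_of_cB_zero (k : Int) (t : Nat) (secs : List (List Int)) (hk : 0 ≤ k)
    (h : cB (flatc secs) k t = 0) : uniform k secs = uniform (k + t) secs := by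
  induction t generalizing k with
  | zero => simp
  | succ t ih =>
    simp only [cB] at h
    have h1 := cntF_nonneg k (flatc secs)
    have h2 := cB_nonneg (flatc secs) (k + 1) t
    have e1 : uniform k secs = uniform (k + 1) secs := uniform_step k secs hk (by omega)
    have e2 : uniform (k + 1) secs = uniform (k + 1 + (t : Int)) secs :=
      ih (k + 1) (by omega) (by omega)
    rw [e1, e2]
    congr 1
    push_cast
    ring

theorem bAssignRow_zero (k : Int) (row : List Int) :
    bAssignRow k 0 row = (row.map (clampv k), 0) := by
  induction row with
  | nil => simp [bAssignRow]
  | cons m ms ih =>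
    simp only [bAssignRow, List.map_cons]
    rw [if_neg (by simp)]
    simp [ih, clampv]

theorem bAssign_zero (k : Int) (secs : List (List Int)) :
    bAssign k 0 secs = (uniform k secs, 0) := by
  induction secs with
  | nil => simp [bAssign, uniform]
  | cons s ss ih =>
    simp only [bAssign, uniform, List.map_cons]
    rw [bAssignRow_zero]
    simp only []
    rw [ih]
    simp [uniform]

theorem bAssignRow_snd (k r : Int) (row : List Int) (hr : 0 ≤ r) :
    (bAssignRow k r row).2 = max 0 (r - cntF k row) := by
  induction row generalizing r with
  | nil =>
    simp only [bAssignRow, cntF, List.countP_nil, Nat.cast_zero]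
    omega
  | cons m ms ih =>
    rw [cntF_cons]
    have hn := cntF_nonneg k ms
    simp only [bAssignRow]
    by_cases hc : 1 + k < m ∧ 0 < r
    · rw [if_pos hc]
      simp only []
      rw [ih (r - 1) (by omega)]
      rw [if_pos hc.1]
      omega
    · rw [if_neg hc]
      simp only []
      rw [ih r hr]
      by_cases hm : 1 + k < m
      · have hr0 : r = 0 := by omega
        rw [if_pos hm, hr0]
        omega
      · rw [if_neg hm]
        omega

theorem bAssign_snd (k r : Int) (secs : List (List Int)) (hr : 0 ≤ r) :
    (bAssign k r secs).2 = max 0 (r - cntF k (flatc secs)) := by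
  induction secs generalizing r with
  | nil =>
    simp only [bAssign, flatc, List.flatMap_nil, cntF, List.countP_nil, Nat.cast_zero]
    omega
  | cons s ss ih =>
    have hflat : flatc (s :: ss) = s ++ flatc ss := by simp [flatc]
    rw [hflat, cntF_append]
    simp only [bAssign]
    have hs := bAssignRow_snd k r s hr
    have hs2 : 0 ≤ (bAssignRow k r s).2 := by rw [hs]; omega
    rw [ih _ hs2, hs]
    have c1 := cntF_nonneg k s
    have c2 := cntF_nonneg k (flatc ss)
    omega

theorem bAssignRow_full (k r : Int) (row : List Int) (hk : 0 ≤ k) (h : cntF k row ≤ r) :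
    bAssignRow k r row = (row.map (clampv (k + 1)), r - cntF k row) := by
  induction row generalizing r with
  | nil => simp [bAssignRow, cntF]
  | cons m ms ih =>
    rw [cntF_cons] at h
    have hn := cntF_nonneg k ms
    simp only [bAssignRow, List.map_cons]
    by_cases hm : 1 + k < m
    · rw [if_pos hm] at h
      have hr0 : 0 < r := by omega
      rw [if_pos ⟨hm, hr0⟩]
      rw [ih (r - 1) (by omega)]
      rw [cntF_cons, if_pos hm]
      simp only [Prod.mk.injEq, List.cons.injEq]
      refine ⟨⟨?_, trivial⟩, by omega⟩
      unfold clampv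
      split_ifs <;> omega
    · rw [if_neg hm] at h
      rw [if_neg (by tauto)]
      rw [ih r (by omega)]
      rw [cntF_cons, if_neg hm]
      simp only [Prod.mk.injEq, List.cons.injEq]
      refine ⟨⟨?_, trivial⟩, by omega⟩
      unfold clampv
      split_ifs <;> omega

theorem bAssign_full (k r : Int) (secs : List (List Int)) (hk : 0 ≤ k)
    (h : cntF k (flatc secs) ≤ r) :
    bAssign k r secs = (uniform (k + 1) secs, r - cntF k (flatc secs)) := by
  induction secs generalizing r with
  | nil => simp [bAssign, uniform, flatc, cntF]
  | cons s ss ih =>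
    have hflat : flatc (s :: ss) = s ++ flatc ss := by simp [flatc]
    rw [hflat, cntF_append] at h ⊢
    have c1 := cntF_nonneg k s
    have c2 := cntF_nonneg k (flatc ss)
    simp only [bAssign, uniform, List.map_cons]
    rw [bAssignRow_full k r s hk (by omega)]
    simp only []
    rw [ih (r - cntF k s) (by omega)]
    simp only [uniform, Prod.mk.injEq]
    exact ⟨trivial, by ring⟩

theorem passRow_eq (k : Int) (row : List Int) (rem : Int) (hk : 0 ≤ k) (hr : 0 ≤ rem) :
    aPassRow rem (row.map (clampv k)) row = bAssignRow k rem row := by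
  induction row generalizing rem with
  | nil => simp [aPassRow, bAssignRow]
  | cons m ms ih =>
    by_cases h0 : rem = 0
    · subst h0
      rw [bAssignRow_zero]
      simp [aPassRow]
    · simp only [List.map_cons, aPassRow, bAssignRow]
      rw [if_neg h0]
      by_cases hm : 1 + k < m
      · have hv : clampv k m < m := by unfold clampv; split_ifs <;> omega
        rw [if_pos hv, if_pos ⟨hm, by omega⟩, ih (rem - 1) (by omega)]
        rfl
      · have hv : ¬ clampv k m < m := by unfold clampv; split_ifs <;> omega
        rw [if_neg hv, if_neg (by tauto), ih rem hr]
        rfl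

theorem pass_eq (k : Int) (secs : List (List Int)) (rem : Int) (hk : 0 ≤ k) (hr : 0 ≤ rem) :
    aPass rem (uniform k secs) secs = bAssign k rem secs := by
  induction secs generalizing rem with
  | nil => simp [aPass, bAssign, uniform]
  | cons s ss ih =>
    simp only [uniform, List.map_cons, aPass, bAssign]
    rw [passRow_eq k s rem hk hr]
    have h2 : 0 ≤ (bAssignRow k rem s).2 := by
      rw [bAssignRow_snd k rem s hr]; omega
    have := ih (bAssignRow k rem s).2 h2
    simp only [uniform] at this
    rw [this]

theorem aLoop_zero (f : Nat) (d secs : List (List Int)) : aLoop f 0 d secs = d := by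
  cases f <;> simp [aLoop]

theorem aLoop_nonpos (f : Nat) (rem : Int) (d secs : List (List Int)) (h : rem ≤ 0) :
    aLoop f rem d secs = d := by
  cases f <;> simp [aLoop] <;> omega

theorem aLoop_main (f : Nat) (t : Nat) (k rem r' : Int) (secs : List (List Int))
    (hk : 0 ≤ k) (hrem : 0 ≤ rem) (hf : rem.toNat ≤ f)
    (hcap : rem ≤ capF k (flatc secs)) (hr' : 0 ≤ r')
    (hdec : rem = cB (flatc secs) k t + r')
    (hstop : r' < cntF (k + t) (flatc secs) ∨ r' = 0) :
    aLoop f rem (uniform k secs) secs = (bAssign (k + t) r' secs).1 := by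
  induction f generalizing t k rem r' with
  | zero =>
    have h0 : rem = 0 := by omega
    subst h0
    have hb := cB_nonneg (flatc secs) k t
    have hr0 : r' = 0 := by omega
    have hcb : cB (flatc secs) k t = 0 := by omega
    subst hr0
    rw [aLoop_zero, bAssign_zero]
    exact uniform_eq_of_cB_zero k t secs hk hcb
  | succ f ih =>
    by_cases h0 : rem = 0
    · subst h0
      have hb := cB_nonneg (flatc secs) k t
      have hr0 : r' = 0 := by omega
      have hcb : cB (flatc secs) k t = 0 := by omega
      subst hr0
      rw [aLoop_zero, bAssign_zero]
      exact uniform_eq_of_cB_zero k t secs hk hcb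
    · have hpos : 0 < rem := by omega
      simp only [aLoop]
      rw [if_pos hpos, pass_eq k secs rem hk hrem]
      cases t with
      | zero =>
        simp only [cB] at hdec
        have hre : rem = r' := by omega
        have hcnt : r' < cntF k (flatc secs) := by
          rcases hstop with h | h
          · simpa using h
          · omega
        have hsnd : (bAssign k rem secs).2 = 0 := by
          rw [bAssign_snd k rem secs hrem]; omega
        rw [hsnd, aLoop_zero, show k + ((0 : Nat) : Int) = k by simp, hre]
      | succ t' =>
        have hcB' : cB (flatc secs) k (t' + 1)
            = cntF k (flatc secs) + cB (flatc secs) (k + 1) t' := rfl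
        rw [hcB'] at hdec
        have hb2 := cB_nonneg (flatc secs) (k + 1) t'
        have hnn := cntF_nonneg k (flatc secs)
        have hge : cntF k (flatc secs) ≤ rem := by omega
        have hcnt1 : 1 ≤ cntF k (flatc secs) := by
          by_contra hc
          have hz : cntF k (flatc secs) = 0 := by omega
          have := capF_zero_of_cntF k (flatc secs) hz
          omega
        rw [bAssign_full k rem secs hk hge]
        have harg : k + ((t' + 1 : Nat) : Int) = k + 1 + (t' : Int) := by push_cast; ring
        rw [harg] at hstop ⊢
        exact ih t' (k + 1) (rem - cntF k (flatc secs)) r' (by omega) (by omega)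
          (by omega) (by rw [capF_succ]; omega) hr' (by omega) hstop

theorem ones_sum_flat (secs : List (List Int)) :
    ((secs.map (fun s => s.map (fun _ => (1 : Int)))).map (fun s => s.sum)).sum
      = ((secs.flatMap id).length : Int) := by
  induction secs with
  | nil => simp
  | cons s ss ih =>
    have hones : (s.map (fun _ => (1 : Int))).sum = s.length := by
      induction s with
      | nil => simp
      | cons a l ih2 =>
        simp only [List.map_cons, List.sum_cons, List.length_cons]
        push_cast
        omega
    simp only [List.map_cons, List.sum_cons, List.flatMap_cons, List.length_append, id]
    rw [ih, hones]
    push_cast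
    ring

theorem sum_map_sum (secs : List (List Int)) :
    (secs.map (fun s => s.sum)).sum = (secs.flatMap id).sum := by
  induction secs with
  | nil => simp
  | cons s ss ih =>
    simp only [List.flatMap_cons, List.map_cons, List.sum_cons, List.sum_append, id]
    rw [ih]

theorem foldl_max_init (l : List Int) (a : Int) :
    a ≤ l.foldl (fun h d => if h < d then d else h) a := by
  induction l generalizing a with
  | nil => simp
  | cons d l ih =>
    simp only [List.foldl_cons]
    refine le_trans ?_ (ih (if a < d then d else a))
    split_ifs <;> omega

theorem foldl_max_mem (l : List Int) (a d : Int) (hd : d ∈ l) :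
    d ≤ l.foldl (fun h d => if h < d then d else h) a := by
  induction l generalizing a with
  | nil => simp at hd
  | cons e l ih =>
    simp only [List.foldl_cons]
    rcases List.mem_cons.mp hd with h | h
    · subst h
      refine le_trans ?_ (foldl_max_init l (if a < d then d else a))
      split_ifs <;> omega
    · exact ih _ h

theorem bSearch_spec (f : Nat) (lo hi rem : Int) (ds : List Int)
    (h0 : 0 ≤ lo) (hlh : lo ≤ hi) (hf : (hi - lo).toNat ≤ f)
    (hlow : bConsumed lo ds ≤ rem)
    (hhigh : rem < bConsumed (hi + 1) ds ∨ ∀ d ∈ ds, d ≤ hi) :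
    0 ≤ bSearch f lo hi rem ds ∧ bConsumed (bSearch f lo hi rem ds) ds ≤ rem ∧
      (rem < bConsumed (bSearch f lo hi rem ds + 1) ds ∨ ∀ d ∈ ds, d ≤ bSearch f lo hi rem ds) := by
  induction f generalizing lo hi with
  | zero =>
    have he : hi = lo := by omega
    subst he
    simpa [bSearch] using ⟨h0, hlow, hhigh⟩
  | succ f ih =>
    simp only [bSearch]
    by_cases hlt : lo < hi
    · rw [if_pos hlt]
      have hmid : PySem.Int.floordiv (lo + hi + 1) 2 = (lo + hi + 1) / 2 :=
        PySem.Int.floordiv_eq_ediv_of_pos (by norm_num)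
      rw [hmid]
      have hb1 : lo < (lo + hi + 1) / 2 := by omega
      have hb2 : (lo + hi + 1) / 2 ≤ hi := by omega
      by_cases hc : bConsumed ((lo + hi + 1) / 2) ds ≤ rem
      · rw [if_pos hc]
        exact ih ((lo + hi + 1) / 2) hi (by omega) (by omega) (by omega) hc hhigh
      · rw [if_neg hc]
        refine ih lo ((lo + hi + 1) / 2 - 1) h0 (by omega) (by omega) hlow (Or.inl ?_)
        have : (lo + hi + 1) / 2 - 1 + 1 = (lo + hi + 1) / 2 := by ring
        rw [this]
        omega
    · rw [if_neg hlt]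
      have he : lo = hi := by omega
      subst he
      exact ⟨h0, hlow, hhigh⟩

theorem consumed_all (k : Int) (ds : List Int) (h : ∀ d ∈ ds, d ≤ k) :
    bConsumed k ds = ds.sum := by
  induction ds with
  | nil => simp [bConsumed]
  | cons d l ih =>
    simp only [bConsumed, List.map_cons, List.sum_cons] at *
    rw [ih (fun x hx => h x (List.mem_cons_of_mem _ hx))]
    have := h d List.mem_cons_self
    omega

-- ===== VERDICT (by name: the statement is the Claim_ definition above) =====
theorem get_section_marks_spec : Claim_equal_get_section_marks := by
  intro t secs _ hpre
  unfold Pre_get_section_marks at hpre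
  unfold Spec_get_section_marks
  simp only [get_section_marks, get_section_marks_alt]
  rw [if_pos hpre, if_pos hpre]
  obtain ⟨hp1, hp2⟩ := hpre
  have hdefic : (fun (m : Int) => if 1 < m then m - 1 else 0) = defic := rfl
  rw [hdefic]
  have hclz : ∀ m : Int, clampv 0 m = 1 := by
    intro m; unfold clampv; split_ifs <;> omega
  have hdist : secs.map (fun s => s.map (fun _ => (1 : Int))) = uniform 0 secs := by
    unfold uniform
    apply List.map_congr_left
    intro s _
    apply List.map_congr_left
    intro m _
    exact (hclz m).symm
  rw [ones_sum_flat, hdist]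
  rw [sum_map_sum] at hp2
  set flat := secs.flatMap id with hflatdef
  have hflat : flatc secs = flat := rfl
  set n : Int := (flat.length : Int) with hn
  set rem0 : Int := t - n with hrem0
  set REM : Int := if rem0 < 0 then 0 else rem0 with hREM
  have hREMnn : 0 ≤ REM := by rw [hREM]; split_ifs <;> omega
  have hREMcap : REM ≤ capF 0 flat := by
    have hc := sum_sub_len_le_capF flat
    have hcn := capF_nonneg 0 flat
    rw [hREM]
    split_ifs with hneg
    · omega
    · omega
  have hloopstart : aLoop rem0.toNat rem0 (uniform 0 secs) secs
      = aLoop REM.toNat REM (uniform 0 secs) secs := by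
    rw [hREM]
    split_ifs with hneg
    · rw [aLoop_nonpos _ _ _ _ (by omega), aLoop_zero]
    · rfl
  rw [hloopstart]
  set ds := flat.map defic with hds
  set hi := ds.foldl (fun h d => if h < d then d else h) 0 with hhi
  have hhinn : 0 ≤ hi := foldl_max_init ds 0
  have hcons0 : bConsumed 0 ds = 0 := by
    have := consumed_eq_cB flat 0
    simpa [cB] using this
  obtain ⟨hknn, hkle, hkhigh⟩ := bSearch_spec hi.toNat 0 hi REM ds (le_refl 0) hhinn
    (by omega) (by rw [hcons0]; exact hREMnn) (Or.inr (fun d hd => foldl_max_mem ds 0 d hd))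
  set k := bSearch hi.toNat 0 hi REM ds with hk
  set r := REM - bConsumed k ds with hr
  have hrnn : 0 ≤ r := by omega
  set t' := k.toNat with ht'
  have hkt : (t' : Int) = k := by omega
  have hconsk : bConsumed k ds = cB flat 0 t' := by
    rw [← hkt, hds]
    exact consumed_eq_cB flat t'
  have hdec : REM = cB flat 0 t' + r := by rw [← hconsk]; omega
  have hstop : r < cntF (0 + (t' : Int)) flat ∨ r = 0 := by
    rcases hkhigh with h | h
    · left
      have hc1 : bConsumed (k + 1) ds = cB flat 0 (t' + 1) := by
        rw [hds, show k + 1 = ((t' + 1 : Nat) : Int) by omega]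
        exact consumed_eq_cB flat (t' + 1)
      rw [hc1, cB_succ_right] at h
      omega
    · right
      have hsum : bConsumed k ds = ds.sum := consumed_all k ds h
      have hdsum : ds.sum = capF 0 flat := by
        rw [hds]
        have he : defic = fun m : Int => max 0 (m - (1 + 0)) := by
          funext m; unfold defic; split_ifs <;> omega
        rw [he]
        rfl
      omega
  have hmain := aLoop_main REM.toNat t' 0 REM r secs (le_refl 0) hREMnn (le_refl _)
    (by rw [hflat]; exact hREMcap) hrnn (by rw [hflat]; exact hdec) (by rw [hflat]; exact hstop)
  rw [hmain, show (0 : Int) + (t' : Int) = k from by omega]
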